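-- pv_equiv track=rewrite | github.com/Jkiming/time_calculator | time_calculator.py | dias
-- ===== SOURCE A (Python) =====
-- def dias(horas,minutos):
--     d = 0
--     horas = horas + 1 if minutos >= 60 else horas
--     while horas >= 0:
--         if horas % 24 == 0:
--             d += 1
--         horas -= 1
--     return d
-- ===== SOURCE B (Python) =====
-- def dias(horas, minutos):
--     # closed form: after the minutos>=60 adjustment, count multiples of 24 in [0, horas]
--     h = horas + 1 if minutos >= 60 else horas
--     return h // 24 + 1 if h >= 0 else 0
-- ===== Notes on version B (the rewrite author's own statement) =====
-- stated objective: faster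
-- what changed: Replaces the O(horas) countdown loop that tests each value for divisibility by 24 with the closed form h//24+1 for h>=0 (0 otherwise).
import Mathlib
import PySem

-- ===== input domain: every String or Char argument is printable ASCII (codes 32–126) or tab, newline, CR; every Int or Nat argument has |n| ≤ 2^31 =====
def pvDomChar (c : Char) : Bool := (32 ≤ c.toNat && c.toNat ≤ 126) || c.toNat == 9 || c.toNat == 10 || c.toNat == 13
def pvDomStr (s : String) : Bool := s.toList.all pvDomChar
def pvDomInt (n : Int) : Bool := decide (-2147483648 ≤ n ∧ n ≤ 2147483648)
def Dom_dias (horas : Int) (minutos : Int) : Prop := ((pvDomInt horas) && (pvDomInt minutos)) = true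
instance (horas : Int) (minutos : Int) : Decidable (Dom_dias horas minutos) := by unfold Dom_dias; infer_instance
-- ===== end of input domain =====

-- B replaces A's O(horas) countdown loop with the O(1) closed form h//24+1 (0 for h<0).


-- ===== PORT A =====
-- the while loop: decrement horas until it drops below 0, counting multiples of 24
def diasLoop (h : Int) (d : Int) : Int :=
  if 0 ≤ h then
    diasLoop (h - 1) (if PySem.Int.mod h 24 = 0 then d + 1 else d)
  else d
termination_by (h + 1).toNat
decreasing_by omega

def dias (horas : Int) (minutos : Int) : Int :=
  diasLoop (if minutos ≥ 60 then horas + 1 else horas) 0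

-- ===== PORT B =====
def dias_alt (horas : Int) (minutos : Int) : Int :=
  let h := if minutos ≥ 60 then horas + 1 else horas
  if h ≥ 0 then PySem.Int.floordiv h 24 + 1 else 0

-- ===== PRECONDITION & SPEC =====
def Spec_dias (horas : Int) (minutos : Int) (out : Int) : Prop := out = dias_alt horas minutos
instance (horas : Int) (minutos : Int) (out : Int) : Decidable (Spec_dias horas minutos out) := by unfold Spec_dias; infer_instance

-- ===== CLAIM (what is proved, stated in full; the proofs are below) =====
def Claim_equal_dias : Prop := ∀ (horas : Int) (minutos : Int), Dom_dias horas minutos → Spec_dias horas minutos (dias horas minutos)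

-- ===== LEMMAS AND PROOFS =====
theorem diasLoop_eq (h d : Int) :
    diasLoop h d = d + (if 0 ≤ h then PySem.Int.floordiv h 24 + 1 else 0) := by
  induction h, d using diasLoop.induct with
  | case1 h d hpos ih =>
      rw [diasLoop, if_pos hpos]; simp only [dite_eq_ite] at ih; rw [ih]
      have hmod : PySem.Int.mod h 24 = h % 24 := PySem.Int.mod_eq_emod_of_pos (by omega)
      have e0 : PySem.Int.floordiv h 24 = h / 24 := PySem.Int.floordiv_eq_ediv_of_pos (by omega)
      have e1 : PySem.Int.floordiv (h - 1) 24 = (h - 1) / 24 :=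
        PySem.Int.floordiv_eq_ediv_of_pos (by omega)
      rw [hmod, e0, e1]
      split_ifs <;> omega
  | case2 h d hneg =>
      rw [diasLoop]
      simp [hneg]

-- ===== VERDICT (by name: the statement is the Claim_ definition above) =====
theorem dias_spec : Claim_equal_dias := by
  intro horas minutos _
  unfold Spec_dias dias dias_alt
  rw [diasLoop_eq]
  simp only [ge_iff_le, zero_add]
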